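-- pv_equiv track=rewrite | github.com/martinabaizan/Game-of-life | game_of_life.py | top_right_neighbours
-- ===== SOURCE A (Python) =====
-- def top_right_neighbours(board,size, x, y):
--     neighbours0 = []
--     for i in range(size):
--         neighbours0.append(0)  # first raw has no top neighbours (compute as 0)
--     neighbours = []
--     for x in range(size-1):
--         for y in range(size-1):
--             neighbours.append((board[x][y+1]))
--         neighbours.append(0) #last column has no right neighbours (compute as 0)
--     nei = neighbours0 + neighbours
--     matrix_top_right_neighbours = [nei[x:x + size] for x in range(0, len(nei), size)]  # create matrix
--     return matrix_top_right_neighbours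
-- ===== SOURCE B (Python) =====
-- def top_right_neighbours(board, size, x, y):
--     return [[board[r - 1][c + 1] if r > 0 and c < size - 1 else 0
--              for c in range(size)]
--             for r in range(size)]
-- ===== Notes on version B (the rewrite author's own statement) =====
-- stated objective: simpler
-- what changed: Replaces A's build-a-flat-1D-list (zeros row + per-row blocks + sentinel zeros) followed by slice-based reshaping with a direct size x size construction that computes each cell by index arithmetic (board[r-1][c+1] when r>0 and c<size-1, else 0); Pre_ excludes only inputs where A raises (size==0 ValueError, under-sized boards IndexError).
import Mathlib
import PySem

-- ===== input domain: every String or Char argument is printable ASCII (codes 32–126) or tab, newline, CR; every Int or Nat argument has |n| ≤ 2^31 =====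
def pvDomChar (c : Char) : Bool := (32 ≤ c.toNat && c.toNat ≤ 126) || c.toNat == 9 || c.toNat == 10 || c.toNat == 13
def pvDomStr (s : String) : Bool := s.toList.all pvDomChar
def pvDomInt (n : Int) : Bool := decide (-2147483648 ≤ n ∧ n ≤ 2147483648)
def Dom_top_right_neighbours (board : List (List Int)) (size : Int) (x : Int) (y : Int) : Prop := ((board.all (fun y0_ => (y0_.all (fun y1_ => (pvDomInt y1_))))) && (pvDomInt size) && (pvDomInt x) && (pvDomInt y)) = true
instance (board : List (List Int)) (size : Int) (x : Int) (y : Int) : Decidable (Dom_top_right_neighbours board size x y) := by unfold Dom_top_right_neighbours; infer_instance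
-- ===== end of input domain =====

-- B builds the size×size matrix directly by index arithmetic instead of A's flat list + slice reshaping (objective: simpler).

-- ===== PORT A =====
-- literal transliteration of A: zeros row, then per-row blocks ending in 0, concatenated and re-chunked by slicing
def top_right_neighbours (board : List (List Int)) (size : Int) (x : Int) (y : Int) : List (List Int) :=
  let neighbours0 : List Int :=
    (PySem.List.pyRange 0 size 1).foldl (fun acc _ => acc ++ [(0 : Int)]) []
  let neighbours : List Int :=
    (PySem.List.pyRange 0 (size - 1) 1).foldl (fun acc x =>
      ((PySem.List.pyRange 0 (size - 1) 1).foldl (fun acc2 y =>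
        acc2 ++ [PySem.List.pyGetD (PySem.List.pyGetD board x []) (y + 1) 0]) acc) ++ [(0 : Int)]) []
  let nei : List Int := neighbours0 ++ neighbours
  (PySem.List.pyRange 0 (nei.length : Int) size).map
    (fun x => PySem.List.slice nei (some x) (some (x + size)))

-- ===== PORT B =====
def top_right_neighbours_alt (board : List (List Int)) (size : Int) (x : Int) (y : Int) : List (List Int) :=
  (PySem.List.pyRange 0 size 1).map (fun r =>
    (PySem.List.pyRange 0 size 1).map (fun c =>
      if 0 < r ∧ c < size - 1 then
        PySem.List.pyGetD (PySem.List.pyGetD board (r - 1) []) (c + 1) 0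
      else 0))

-- ===== PRECONDITION & SPEC =====
-- Pre_ excludes exactly the inputs where A raises: size = 0 (range step 0 → ValueError) and, for
-- positive size, boards with fewer than size-1 rows or with one of those rows shorter than size (IndexError).
def Pre_top_right_neighbours (board : List (List Int)) (size : Int) (x : Int) (y : Int) : Prop :=
  size ≠ 0 ∧ (size - 1).toNat ≤ board.length ∧
    ∀ row ∈ board.take (size - 1).toNat, size.toNat ≤ row.length
instance (board : List (List Int)) (size : Int) (x : Int) (y : Int) : Decidable (Pre_top_right_neighbours board size x y) := by unfold Pre_top_right_neighbours; infer_instance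

def pvWitness_top_right_neighbours : List (List Int) × Int × Int × Int :=
  ([[1, 2, 3], [4, 5, 6], [7, 8, 9]], 3, 0, 0)

def Spec_top_right_neighbours (board : List (List Int)) (size : Int) (x : Int) (y : Int) (out : List (List Int)) : Prop := out = top_right_neighbours_alt board size x y
instance (board : List (List Int)) (size : Int) (x : Int) (y : Int) (out : List (List Int)) : Decidable (Spec_top_right_neighbours board size x y out) := by unfold Spec_top_right_neighbours; infer_instance

-- ===== CLAIM (what is proved, stated in full; the proofs are below) =====
def Claim_equal_top_right_neighbours : Prop := ∀ (board : List (List Int)) (size : Int) (x : Int) (y : Int), Dom_top_right_neighbours board size x y → Pre_top_right_neighbours board size x y → Spec_top_right_neighbours board size x y (top_right_neighbours board size x y)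

-- ===== LEMMAS AND PROOFS =====

-- one row of the intended result (r ≥ 1 in the matrix corresponds to board row r-1 here)
def pvRow (board : List (List Int)) (size r : Int) : List Int :=
  (PySem.List.pyRange 0 (size - 1) 1).map
    (fun c => PySem.List.pyGetD (PySem.List.pyGetD board r []) (c + 1) 0) ++ [(0 : Int)]

def pvRows (board : List (List Int)) (size : Int) : List (List Int) :=
  List.replicate size.toNat (0 : Int)
    :: (PySem.List.pyRange 0 (size - 1) 1).map (pvRow board size)

-- A's double loop: each outer step appends the inner-mapped block plus a trailing 0
theorem pv_foldl_outer {γ : Type} (l₁ l₂ : List γ) (F : γ → γ → Int) (acc : List Int) :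
    List.foldl (fun acc x =>
      (List.foldl (fun acc2 y => acc2 ++ [F x y]) acc l₂) ++ [(0 : Int)]) acc l₁
    = acc ++ l₁.flatMap (fun x => l₂.map (F x) ++ [(0 : Int)]) := by
  have hstep : (fun (acc : List Int) (x : γ) =>
      (List.foldl (fun acc2 y => acc2 ++ [F x y]) acc l₂) ++ [(0 : Int)])
      = fun acc x => acc ++ (l₂.map (F x) ++ [(0 : Int)]) := by
    funext acc x
    rw [PySem.List.foldl_append_singleton_eq_map, List.append_assoc]
  rw [hstep, PySem.List.foldl_append_eq_flatMap]

theorem pv_flat_length (rows : List (List Int)) (n : Nat)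
    (h : ∀ row ∈ rows, row.length = n) : rows.flatten.length = rows.length * n := by
  induction rows with
  | nil => simp
  | cons r t ih =>
    simp only [List.flatten_cons, List.length_append, List.length_cons,
      h r (by simp), ih (fun row hr => h row (by simp [hr]))]
    ring

theorem pv_flat_drop_take (rows : List (List Int)) (n : Nat)
    (h : ∀ row ∈ rows, row.length = n) :
    ∀ k : Nat, (hk : k < rows.length) →
      (rows.flatten.drop (n * k)).take n = rows[k] := by
  induction rows with
  | nil => intro k hk; simp at hk
  | cons r t ih =>
    intro k hk
    cases k with
    | zero =>
      simp only [Nat.mul_zero, List.drop_zero, List.flatten_cons, List.getElem_cons_zero]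
      exact List.take_left' (h r (by simp))
    | succ k =>
      have hr : r.length = n := h r (by simp)
      have hmul : n * (k + 1) = r.length + n * k := by rw [hr]; ring
      simp only [List.flatten_cons, hmul, List.getElem_cons_succ]
      rw [List.drop_append]
      simp only [Nat.add_sub_cancel_left, List.drop_of_length_le, List.nil_append,
        Nat.le_add_right]
      exact ih (fun row hrw => h row (by simp [hrw])) k (by simpa using hk)

-- re-chunking a flat concatenation of equal-length rows by slices of that length recovers the rows
theorem pv_chunk (rows : List (List Int)) (n : Nat) (hn : 0 < n)
    (h : ∀ row ∈ rows, row.length = n) :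
    (PySem.List.pyRange 0 (rows.flatten.length : Int) (n : Int)).map
      (fun i => PySem.List.slice rows.flatten (some i) (some (i + (n : Int)))) = rows := by
  have hlen := pv_flat_length rows n h
  have hnz : (0 : Int) < (n : Int) := by exact_mod_cast hn
  rw [PySem.List.pyRange_of_pos 0 (rows.flatten.length : Int) hnz]
  have hcount : (if (0 : Int) < (rows.flatten.length : Int)
      then (((rows.flatten.length : Int) - 0 + (n : Int) - 1) / (n : Int)).toNat else 0)
      = rows.length := by
    rcases Nat.eq_zero_or_pos rows.length with hm | hm
    · simp [hlen, hm]
    · have hpos : (0 : Int) < (rows.flatten.length : Int) := by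
        have : 0 < rows.length * n := Nat.mul_pos hm hn
        rw [hlen]; exact_mod_cast this
      rw [if_pos hpos]
      have harith : ((rows.flatten.length : Int) - 0 + (n : Int) - 1) / (n : Int)
          = (rows.length : Int) := by
        have he : ((rows.flatten.length : Int) - 0 + (n : Int) - 1)
            = ((n : Int) - 1) + (n : Int) * (rows.length : Int) := by
          rw [hlen]; push_cast; ring
        rw [he, Int.add_mul_ediv_left _ _ (by omega : (n : Int) ≠ 0),
          Int.ediv_eq_zero_of_lt (by omega) (by omega)]
        omega
      rw [harith]; exact Int.toNat_natCast rows.length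
  rw [hcount]
  apply List.ext_getElem
  · simp
  · intro k h1 h2
    simp only [List.getElem_map, List.getElem_range, zero_add]
    have hcast2 : (n : Int) * (k : Int) + (n : Int) = ((n * k + n : Nat) : Int) := by
      push_cast; ring
    have hcast1 : (n : Int) * (k : Int) = ((n * k : Nat) : Int) := by push_cast; ring
    rw [hcast2, hcast1, PySem.List.slice_natCast, Nat.add_sub_cancel_left]
    exact pv_flat_drop_take rows n h k (by simpa using h2)

theorem pv_range_split (size : Int) (h : 0 < size) :
    PySem.List.pyRange 0 size 1 = PySem.List.pyRange 0 (size - 1) 1 ++ [size - 1] := by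
  rw [PySem.List.pyRange_one_append 0 (size - 1) size (by omega) (by omega)]
  congr 1
  have hs := PySem.List.pyRange_one_singleton (size - 1)
  rw [show size - 1 + 1 = size from by ring] at hs
  exact hs

-- B computes exactly the row list pvRows
theorem pv_B (board : List (List Int)) (size x y : Int) (h : 0 < size) :
    top_right_neighbours_alt board size x y = pvRows board size := by
  unfold top_right_neighbours_alt pvRows
  have hcong : ∀ r ∈ PySem.List.pyRange 0 size 1,
      (PySem.List.pyRange 0 size 1).map (fun c =>
        if 0 < r ∧ c < size - 1 then
          PySem.List.pyGetD (PySem.List.pyGetD board (r - 1) []) (c + 1) 0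
        else 0)
      = if r = 0 then List.replicate size.toNat (0 : Int) else pvRow board size (r - 1) := by
    intro r hr
    by_cases h0 : r = 0
    · subst h0
      rw [if_pos rfl]
      have hz : ∀ c ∈ PySem.List.pyRange 0 size 1,
          (if 0 < (0 : Int) ∧ c < size - 1 then
            PySem.List.pyGetD (PySem.List.pyGetD board ((0 : Int) - 1) []) (c + 1) 0
          else 0) = (0 : Int) := by
        intro c _; simp
      rw [List.map_congr_left hz, List.map_const', PySem.List.length_pyRange_one, sub_zero]
    · have hrpos : 0 < r := by
        have := (PySem.List.mem_pyRange_one.mp hr).1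
        omega
      rw [if_neg h0, pvRow, pv_range_split size h, List.map_append]
      congr 1
      · apply List.map_congr_left
        intro c hc
        exact if_pos ⟨hrpos, (PySem.List.mem_pyRange_one.mp hc).2⟩
      · simp
  rw [List.map_congr_left hcong, PySem.List.pyRange_one_cons h, List.map_cons, if_pos rfl]
  congr 1
  rw [PySem.List.pyRange_one (0 + 1) size, PySem.List.pyRange_one 0 (size - 1), List.map_map,
    List.map_map]
  have hc : (size - (0 + 1)).toNat = (size - 1 - 0).toNat := by omega
  rw [hc]
  apply List.map_congr_left
  intro k _
  simp only [Function.comp_apply]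
  rw [if_neg (by omega : ¬ (0 : Int) + 1 + (k : Int) = 0)]
  congr 1
  omega

-- A builds the flattening of pvRows and re-chunks it by slices
theorem pv_A (board : List (List Int)) (size x y : Int) :
    top_right_neighbours board size x y
    = (PySem.List.pyRange 0 ((pvRows board size).flatten.length : Int) size).map
        (fun i => PySem.List.slice (pvRows board size).flatten (some i) (some (i + size))) := by
  have e : top_right_neighbours board size x y
      = (PySem.List.pyRange 0
          ((((PySem.List.pyRange 0 size 1).foldl (fun acc _ => acc ++ [(0 : Int)]) []) ++
            ((PySem.List.pyRange 0 (size - 1) 1).foldl (fun acc x =>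
              ((PySem.List.pyRange 0 (size - 1) 1).foldl (fun acc2 y =>
                acc2 ++ [PySem.List.pyGetD (PySem.List.pyGetD board x []) (y + 1) 0]) acc) ++
                [(0 : Int)]) [])).length : Int) size).map
          (fun x => PySem.List.slice
            (((PySem.List.pyRange 0 size 1).foldl (fun acc _ => acc ++ [(0 : Int)]) []) ++
              ((PySem.List.pyRange 0 (size - 1) 1).foldl (fun acc x =>
                ((PySem.List.pyRange 0 (size - 1) 1).foldl (fun acc2 y =>
                  acc2 ++ [PySem.List.pyGetD (PySem.List.pyGetD board x []) (y + 1) 0]) acc) ++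
                  [(0 : Int)]) []))
            (some x) (some (x + size))) := rfl
  rw [e]
  have h0 : (PySem.List.pyRange 0 size 1).foldl (fun acc _ => acc ++ [(0 : Int)]) []
      = List.replicate size.toNat (0 : Int) := by
    rw [show (fun (acc : List Int) (_ : Int) => acc ++ [(0 : Int)])
        = (fun (acc : List Int) (x : Int) => acc ++ [(fun _ : Int => (0 : Int)) x]) from rfl,
      PySem.List.foldl_append_singleton_eq_map (fun _ : Int => (0 : Int)),
      List.map_const', PySem.List.length_pyRange_one]
    simp
  have h1 : (PySem.List.pyRange 0 (size - 1) 1).foldl (fun acc x =>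
        ((PySem.List.pyRange 0 (size - 1) 1).foldl (fun acc2 y =>
          acc2 ++ [PySem.List.pyGetD (PySem.List.pyGetD board x []) (y + 1) 0]) acc) ++
          [(0 : Int)]) []
      = (PySem.List.pyRange 0 (size - 1) 1).flatMap (pvRow board size) := by
    rw [pv_foldl_outer (PySem.List.pyRange 0 (size - 1) 1) (PySem.List.pyRange 0 (size - 1) 1)
      (fun r c => PySem.List.pyGetD (PySem.List.pyGetD board r []) (c + 1) 0) []]
    rfl
  rw [h0, h1]
  have hflat : List.replicate size.toNat (0 : Int) ++
      (PySem.List.pyRange 0 (size - 1) 1).flatMap (pvRow board size)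
      = (pvRows board size).flatten := by
    rw [pvRows, List.flatten_cons, List.flatMap_def]
  rw [hflat]

-- ===== VERDICT (by name: the statement is the Claim_ definition above) =====
theorem top_right_neighbours_spec : Claim_equal_top_right_neighbours := by
  intro board size x y _ hpre
  obtain ⟨hne, -, -⟩ := hpre
  unfold Spec_top_right_neighbours
  rcases lt_or_gt_of_ne hne with hneg | hpos
  · -- size < 0 : every range is empty, both sides are []
    have h1 : PySem.List.pyRange 0 size 1 = [] := PySem.List.pyRange_one_eq_nil (le_of_lt hneg)
    have h2 : PySem.List.pyRange 0 (size - 1) 1 = [] := PySem.List.pyRange_one_eq_nil (by omega)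
    have h3 : ∀ s : Int, PySem.List.pyRange 0 0 s = [] := by
      intro s; simp [PySem.List.pyRange]
    unfold top_right_neighbours top_right_neighbours_alt
    rw [h1, h2]
    simp [h3]
  · -- 0 < size
    obtain ⟨n, hsz⟩ : ∃ n : Nat, size = (n : Int) := ⟨size.toNat, by omega⟩
    have hn1 : 0 < n := by omega
    rw [pv_A board size x y, pv_B board size x y hpos, hsz]
    apply pv_chunk (pvRows board (n : Int)) n hn1
    intro row hrow
    rcases List.mem_cons.mp hrow with h0 | hmem
    · rw [h0]; simp
    · obtain ⟨r, -, hr⟩ := List.mem_map.mp hmem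
      rw [← hr, pvRow]
      simp only [List.length_append, List.length_map, PySem.List.length_pyRange_one,
        List.length_singleton]
      omega
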